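-- pv_equiv track=rewrite | github.com/C-Kernel-Engine/C-Kernel-Engine | version/v7/scripts/build_spec10_probe_contract_v7.py | _layout_case_budget
-- ===== SOURCE A (Python) =====
-- LAYOUT_ORDER = (
--     "poster_stack",
--     "comparison_span_chart",
--     "pipeline_lane",
--     "dual_panel_compare",
--     "dashboard_cards",
-- )
--
-- def _layout_case_budget(limit: int) -> dict[str, int]:
--     budgets = {layout: 1 for layout in LAYOUT_ORDER}
--     remaining = max(0, int(limit) - len(LAYOUT_ORDER))
--     idx = 0
--     while remaining > 0:
--         budgets[LAYOUT_ORDER[idx % len(LAYOUT_ORDER)]] += 1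
--         remaining -= 1
--         idx += 1
--     return budgets
-- ===== SOURCE B (Python) =====
-- LAYOUT_ORDER = (
--     "poster_stack",
--     "comparison_span_chart",
--     "pipeline_lane",
--     "dual_panel_compare",
--     "dashboard_cards",
-- )
--
-- def _layout_case_budget(limit: int) -> dict[str, int]:
--     remaining = max(0, int(limit) - len(LAYOUT_ORDER))
--     q, r = divmod(remaining, len(LAYOUT_ORDER))
--     return {name: 1 + q + (1 if i < r else 0) for i, name in enumerate(LAYOUT_ORDER)}
-- ===== Notes on version B (the rewrite author's own statement) =====
-- stated objective: faster
-- what changed: Replaces the unit-at-a-time round-robin while loop with a closed-form divmod of the remaining budget by the number of layouts: every layout gets one plus the quotient, and the first remainder-many layouts get one extra.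
import Mathlib
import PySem

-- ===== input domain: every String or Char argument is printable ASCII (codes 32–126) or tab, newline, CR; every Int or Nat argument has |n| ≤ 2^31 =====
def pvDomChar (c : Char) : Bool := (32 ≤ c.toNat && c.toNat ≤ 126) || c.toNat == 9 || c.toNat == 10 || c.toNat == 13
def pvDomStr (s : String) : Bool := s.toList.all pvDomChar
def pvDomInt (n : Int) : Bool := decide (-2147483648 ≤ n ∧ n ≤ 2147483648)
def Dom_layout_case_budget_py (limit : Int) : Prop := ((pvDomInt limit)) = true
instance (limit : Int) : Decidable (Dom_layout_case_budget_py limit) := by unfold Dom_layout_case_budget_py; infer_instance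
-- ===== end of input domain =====

-- B replaces A's one-unit-at-a-time round-robin while loop by a closed-form divmod (asymptotically faster).

-- ===== PORT A =====
def pvLayoutOrder : List String :=
  ["poster_stack", "comparison_span_chart", "pipeline_lane", "dual_panel_compare", "dashboard_cards"]

-- the while loop of A; 'remaining' is max(0, …) hence nonnegative, carried as the Nat fuel
def pvLoopA : Nat → Nat → PySem.Dict String Int → PySem.Dict String Int
  | 0, _, d => d
  | n + 1, idx, d =>
      pvLoopA n (idx + 1) (d.modify (pvLayoutOrder.getD (idx % pvLayoutOrder.length) "") 0 (· + 1))

def layout_case_budget_py (limit : Int) : List (String × Int) :=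
  let budgets := PySem.Dict.ofList (pvLayoutOrder.map (fun layout => (layout, (1 : Int))))
  let remaining := max 0 (limit - pvLayoutOrder.length)
  (pvLoopA remaining.toNat 0 budgets).items

-- ===== PORT B =====
def layout_case_budget_py_alt (limit : Int) : List (String × Int) :=
  let remaining := max 0 (limit - pvLayoutOrder.length)
  let q := PySem.Int.floordiv remaining pvLayoutOrder.length
  let r := PySem.Int.mod remaining pvLayoutOrder.length
  (PySem.List.enumerate pvLayoutOrder).map (fun p => (p.2, 1 + q + (if (p.1 : Int) < r then 1 else 0)))

-- ===== PRECONDITION & SPEC =====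
def Spec_layout_case_budget_py (limit : Int) (out : List (String × Int)) : Prop := out = layout_case_budget_py_alt limit
instance (limit : Int) (out : List (String × Int)) : Decidable (Spec_layout_case_budget_py limit out) := by unfold Spec_layout_case_budget_py; infer_instance

-- ===== CLAIM (what is proved, stated in full; the proofs are below) =====
def Claim_equal_layout_case_budget_py : Prop := ∀ (limit : Int), Dom_layout_case_budget_py limit → Spec_layout_case_budget_py limit (layout_case_budget_py limit)

-- ===== LEMMAS AND PROOFS =====

-- the dict state of A's loop: always these five keys in this order
def pvMk (a b c d e : Int) : PySem.Dict String Int :=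
  PySem.Dict.mk [("poster_stack", a), ("comparison_span_chart", b), ("pipeline_lane", c),
                 ("dual_panel_compare", d), ("dashboard_cards", e)]

-- one 'budgets[key] += 1' step, for each of the five keys
theorem pvStep (a b c d e : Int) :
    ((pvMk a b c d e).modify "poster_stack" 0 (· + 1) = pvMk (a+1) b c d e) ∧
    ((pvMk a b c d e).modify "comparison_span_chart" 0 (· + 1) = pvMk a (b+1) c d e) ∧
    ((pvMk a b c d e).modify "pipeline_lane" 0 (· + 1) = pvMk a b (c+1) d e) ∧
    ((pvMk a b c d e).modify "dual_panel_compare" 0 (· + 1) = pvMk a b c (d+1) e) ∧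
    ((pvMk a b c d e).modify "dashboard_cards" 0 (· + 1) = pvMk a b c d (e+1)) := by
  refine ⟨?_, ?_, ?_, ?_, ?_⟩ <;>
  simp [pvMk, PySem.Dict.modify, PySem.Dict.insert, PySem.Dict.getD, PySem.Dict.get?,
    PySem.Dict.contains, List.find?]

-- the loop depends on idx only modulo 5
theorem pvLoopA_idx_mod (n : Nat) : ∀ (idx : Nat) (d : PySem.Dict String Int),
    pvLoopA n (idx + 5) d = pvLoopA n idx d := by
  induction n with
  | zero => intro idx d; rfl
  | succ n ih =>
      intro idx d
      show pvLoopA n (idx + 5 + 1) _ = pvLoopA n (idx + 1) _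
      have hl : pvLayoutOrder.length = 5 := rfl
      rw [hl, Nat.add_mod_right]
      have : idx + 5 + 1 = idx + 1 + 5 := by omega
      rw [this, ih]

-- five consecutive steps increment every key once
theorem pvLoopA_chunk (n : Nat) (a b c d e : Int) :
    pvLoopA (n + 5) 0 (pvMk a b c d e) = pvLoopA n 0 (pvMk (a+1) (b+1) (c+1) (d+1) (e+1)) := by
  show pvLoopA (n+1+1+1+1+1) 0 (pvMk a b c d e) = _
  simp only [pvLoopA]
  norm_num [pvLayoutOrder]
  rw [(pvStep a b c d e).1, (pvStep (a+1) b c d e).2.1, (pvStep (a+1) (b+1) c d e).2.2.1,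
      (pvStep (a+1) (b+1) (c+1) d e).2.2.2.1, (pvStep (a+1) (b+1) (c+1) (d+1) e).2.2.2.2]
  exact pvLoopA_idx_mod n 0 _

-- q full rounds add q to every key
theorem pvLoopA_full (q : Nat) : ∀ (r : Nat) (a b c d e : Int),
    pvLoopA (5 * q + r) 0 (pvMk a b c d e) = pvLoopA r 0 (pvMk (a+q) (b+q) (c+q) (d+q) (e+q)) := by
  induction q with
  | zero => intro r a b c d e; norm_num
  | succ q ih =>
      intro r a b c d e
      have h : 5 * (q + 1) + r = (5 * q + r) + 5 := by omega
      rw [h, pvLoopA_chunk, ih]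
      push_cast
      ring_nf

-- closed form of A's loop
theorem pvLoopA_closed (n : Nat) (a b c d e : Int) :
    pvLoopA n 0 (pvMk a b c d e) =
      pvMk (a + (n / 5 : Nat) + (if 0 < n % 5 then 1 else 0))
           (b + (n / 5 : Nat) + (if 1 < n % 5 then 1 else 0))
           (c + (n / 5 : Nat) + (if 2 < n % 5 then 1 else 0))
           (d + (n / 5 : Nat) + (if 3 < n % 5 then 1 else 0))
           (e + (n / 5 : Nat) + (if 4 < n % 5 then 1 else 0)) := by
  have hn : n = 5 * (n / 5) + n % 5 := by omega
  rw [hn, pvLoopA_full]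
  have h5 : (5 * (n / 5) + n % 5) / 5 = n / 5 := by omega
  have h5' : (5 * (n / 5) + n % 5) % 5 = n % 5 := by omega
  rw [h5, h5']
  have hr : n % 5 < 5 := by omega
  interval_cases h : n % 5 <;>
    simp [pvLoopA, pvLayoutOrder, pvMk, PySem.Dict.modify, PySem.Dict.insert, PySem.Dict.getD,
      PySem.Dict.get?, PySem.Dict.contains, List.find?]

-- ===== VERDICT (by name: the statement is the Claim_ definition above) =====
theorem layout_case_budget_py_spec : Claim_equal_layout_case_budget_py := by
  intro limit _
  unfold Spec_layout_case_budget_py layout_case_budget_py layout_case_budget_py_alt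
  set rem : Int := max 0 (limit - pvLayoutOrder.length) with hrem
  have hnn : 0 ≤ rem := le_max_left 0 _
  set n : Nat := rem.toNat with hn
  have hcast : rem = (n : Int) := by simp [hn, Int.toNat_of_nonneg hnn]
  have hlen : (pvLayoutOrder.length : Int) = 5 := by norm_num [pvLayoutOrder]
  have hq : PySem.Int.floordiv rem pvLayoutOrder.length = ((n / 5 : Nat) : Int) := by
    rw [hcast, hlen]; exact_mod_cast PySem.Int.floordiv_natCast n 5
  have hr : PySem.Int.mod rem pvLayoutOrder.length = ((n % 5 : Nat) : Int) := by
    rw [hcast, hlen]; exact_mod_cast PySem.Int.mod_natCast n 5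
  have hd : PySem.Dict.ofList (pvLayoutOrder.map (fun layout => (layout, (1 : Int)))) =
      pvMk 1 1 1 1 1 := by decide
  dsimp only
  rw [hd, pvLoopA_closed, hq, hr]
  simp only [pvMk, pvLayoutOrder, PySem.List.enumerate, List.map]
  norm_num
  refine ⟨?_, ?_, ?_, ?_, ?_⟩ <;> · split <;> split <;> omega
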